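-- pv_equiv track=rewrite | github.com/Ranim-Rabah/Talent_Detection_solution | flaskr/utils.py | is_date
-- ===== SOURCE A (Python) =====
-- def is_date(ch):
--     duree = ['mois','an','ans']
--     mois = ['aujourd’hui',
--             'janv.','févr.','mars.','avr.','mai.','juin.','juil.','août.','sept.','oct.','nov.','déc.',
--             'janv','févr','mars','avr','mai','juin','juil','août','sept','oct','nov','déc']
--     d = 0
--     m = 0
--     for w in ch.split():
--         if d == 0 :
--             if w in mois :
--                 d = 1
--         if m == 0 :
--             if w in duree :
--                 m = 1
--         if d and m :
--             return 1
--     return 0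
-- ===== SOURCE B (Python) =====
-- def is_date(ch):
--     duree = {'mois', 'an', 'ans'}
--     mois = {'aujourd’hui',
--             'janv.','févr.','mars.','avr.','mai.','juin.','juil.','août.','sept.','oct.','nov.','déc.',
--             'janv','févr','mars','avr','mai','juin','juil','août','sept','oct','nov','déc'}
--     words = ch.split()
--     has_month = any(w in mois for w in words)
--     has_duration = any(w in duree for w in words)
--     return int(has_month and has_duration)
-- ===== Notes on version B (the rewrite author's own statement) =====
-- stated objective: idiomatic
-- what changed: Replaces A's single interleaved flag-setting loop with early exit by two independent full scans (any over set membership) combined with a short-circuiting and, returned via int().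
import Mathlib
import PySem

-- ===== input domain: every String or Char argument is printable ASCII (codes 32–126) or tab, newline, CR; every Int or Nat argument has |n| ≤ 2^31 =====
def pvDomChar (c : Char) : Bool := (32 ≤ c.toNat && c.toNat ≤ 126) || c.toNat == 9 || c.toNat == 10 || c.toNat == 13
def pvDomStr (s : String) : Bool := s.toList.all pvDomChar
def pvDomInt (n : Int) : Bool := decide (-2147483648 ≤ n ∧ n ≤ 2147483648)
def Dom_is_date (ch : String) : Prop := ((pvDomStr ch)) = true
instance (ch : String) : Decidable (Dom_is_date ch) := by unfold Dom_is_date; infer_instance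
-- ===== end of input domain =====

-- B is the idiomatic two-pass version: two independent existence scans combined with a
-- short-circuiting 'and', instead of A's interleaved flag-setting loop with early exit.

-- ===== PORT A =====
def dureeA : List String := ["mois", "an", "ans"]
def moisA : List String :=
  ["aujourd’hui",
   "janv.", "févr.", "mars.", "avr.", "mai.", "juin.", "juil.", "août.", "sept.", "oct.", "nov.", "déc.",
   "janv", "févr", "mars", "avr", "mai", "juin", "juil", "août", "sept", "oct", "nov", "déc"]

-- A's loop: state (d, m), early return 1 when both set, else 0 at the end.
def isDateLoopA : List String → Int → Int → Int
  | [], _, _ => 0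
  | w :: ws, d, m =>
    let d := if d = 0 then (if moisA.contains w then 1 else d) else d
    let m := if m = 0 then (if dureeA.contains w then 1 else m) else m
    if d ≠ 0 ∧ m ≠ 0 then 1 else isDateLoopA ws d m

def is_date (ch : String) : Int := isDateLoopA (PySem.Str.split₀ ch) 0 0

-- ===== PORT B =====
def dureeB : PySem.Set String := PySem.Set.ofList ["mois", "an", "ans"]
def moisB : PySem.Set String := PySem.Set.ofList
  ["aujourd’hui",
   "janv.", "févr.", "mars.", "avr.", "mai.", "juin.", "juil.", "août.", "sept.", "oct.", "nov.", "déc.",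
   "janv", "févr", "mars", "avr", "mai", "juin", "juil", "août", "sept", "oct", "nov", "déc"]

def is_date_alt (ch : String) : Int :=
  let words := PySem.Str.split₀ ch
  let hasMonth := words.any (fun w => moisB.contains w)
  let hasDuration := words.any (fun w => dureeB.contains w)
  if hasMonth && hasDuration then 1 else 0

-- ===== PRECONDITION & SPEC =====
def Spec_is_date (ch : String) (out : Int) : Prop := out = is_date_alt ch
instance (ch : String) (out : Int) : Decidable (Spec_is_date ch out) := by unfold Spec_is_date; infer_instance

-- ===== CLAIM (what is proved, stated in full; the proofs are below) =====
def Claim_equal_is_date : Prop := ∀ (ch : String), Dom_is_date ch → Spec_is_date ch (is_date ch)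

-- ===== LEMMAS AND PROOFS =====

theorem moisB_eq : (moisB : List String) = moisA := by decide

theorem dureeB_eq : (dureeB : List String) = dureeA := by decide

-- loop invariant: with the flags encoded as booleans (never both set on entry),
-- A's loop computes B's two-existence-scan formula
theorem loopA_eq (ws : List String) : ∀ (db mb : Bool), ¬(db = true ∧ mb = true) →
    isDateLoopA ws (if db then 1 else 0) (if mb then 1 else 0)
      = if (db || ws.any (fun w => moisA.contains w)) &&
           (mb || ws.any (fun w => dureeA.contains w)) then 1 else 0 := by
  induction ws with
  | nil =>
    intro db mb hnb
    cases db <;> cases mb <;> simp_all [isDateLoopA]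
  | cons w ws ih =>
    intro db mb hnb
    have i00 := ih false false (by simp)
    have i10 := ih true false (by simp)
    have i01 := ih false true (by simp)
    by_cases h1 : w ∈ moisA <;> by_cases h2 : w ∈ dureeA <;> cases db <;> cases mb <;>
      simp_all [isDateLoopA, List.any_cons]

-- ===== VERDICT (by name: the statement is the Claim_ definition above) =====
theorem is_date_spec : Claim_equal_is_date := by
  intro ch _
  unfold Spec_is_date is_date is_date_alt
  have h := loopA_eq (PySem.Str.split₀ ch) false false (by simp)
  simp only [if_neg Bool.false_ne_true, Bool.false_or] at h
  rw [h]
  simp [moisB_eq, dureeB_eq]
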